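-- pv_equiv track=rewrite | github.com/eoc940/Python-data_structure-and-algorithm_PS | programmers-algorythm/kakao/2019_kakao_winter_intern/crain.py | solution
-- ===== SOURCE A (Python) =====
-- def solution(board, moves):
--     answer = 0
--     horizontal = []
--     result = []
--     for i in range(len(board)) :
--         tmp = []
--         for j in range(len(board)-1,-1,-1) :
--             if board[j][i] != 0 :
--                 tmp.append(board[j][i])
--         horizontal.append(tmp)
--     for x in moves :
--         if horizontal[x-1] :
--             result.append(horizontal[x-1].pop())
--             if len(result)>=2 and result[-1]==result[-2] :
--                 answer += 2
--                 result.pop()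
--                 result.pop()
--
--     return answer
-- ===== SOURCE B (Python) =====
-- def solution(board, moves):
--     # Lazy column scan: keep one top-pointer per column instead of prebuilt stacks.
--     n = len(board)
--     tops = [0] * n
--     result = []
--     answer = 0
--     for x in moves:
--         c = x - 1
--         row = tops[c]
--         while row < n and board[row][c] == 0:
--             row += 1
--         if row < n:
--             v = board[row][c]
--             tops[c] = row + 1
--             if result and result[-1] == v:
--                 answer += 2
--                 result.pop()
--             else:
--                 result.append(v)
--     return answer
-- ===== Notes on version B (the rewrite author's own statement) =====
-- stated objective: alternative
-- what changed: B drops A's precomputed per-column stack lists and instead keeps one top-pointer per column, lazily scanning each column downward only when a move hits it, with the pair-cancellation folded into a single compare-then-pop/append on the result stack.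
-- outside the precondition, e.g. on solution([[1, 2, 2], [4, 2, 6]], [0, 0]): A returns 2, B returns 0
import Mathlib
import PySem

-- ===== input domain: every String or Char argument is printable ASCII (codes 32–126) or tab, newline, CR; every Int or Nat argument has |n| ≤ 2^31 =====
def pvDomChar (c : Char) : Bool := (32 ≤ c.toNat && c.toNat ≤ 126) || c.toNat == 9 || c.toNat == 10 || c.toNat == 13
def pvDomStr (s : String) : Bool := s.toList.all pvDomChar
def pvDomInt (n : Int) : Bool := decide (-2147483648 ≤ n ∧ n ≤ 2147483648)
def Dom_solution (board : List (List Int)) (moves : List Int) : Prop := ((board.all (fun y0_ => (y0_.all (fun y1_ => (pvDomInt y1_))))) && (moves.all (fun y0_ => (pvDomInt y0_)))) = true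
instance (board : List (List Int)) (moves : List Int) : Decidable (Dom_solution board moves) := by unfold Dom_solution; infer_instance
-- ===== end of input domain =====

-- B replaces A's precomputed per-column stacks with lazy per-column top pointers scanned on demand (alternative decomposition, same cost class).


-- ===== PORT A =====
-- tmp = []; for j in range(len(board)-1,-1,-1): if board[j][i] != 0: tmp.append(board[j][i])
-- (board[j][i] is pyGetD twice; the defaults are only reached outside Pre_)
def pvColA (board : List (List Int)) (i : Int) : List Int :=
  (PySem.List.pyRange ((board.length : Int) - 1) (-1) (-1)).foldl
    (fun tmp j => if PySem.List.pyGetD (PySem.List.pyGetD board j []) i 0 ≠ 0 then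
        tmp ++ [PySem.List.pyGetD (PySem.List.pyGetD board j []) i 0] else tmp) []

-- horizontal = []; for i in range(len(board)): horizontal.append(tmp)
def pvHorizontal (board : List (List Int)) : List (List Int) :=
  (PySem.List.pyRange 0 (board.length : Int) 1).foldl
    (fun h i => h ++ [pvColA board i]) []

-- body of 'for x in moves'
def pvStepA (st : Int × List (List Int) × List Int) (x : Int) :
    Int × List (List Int) × List Int :=
  let answer := st.1
  let h := st.2.1
  let result := st.2.2
  let col := PySem.List.pyGetD h (x - 1) []
  if col ≠ [] then
    match PySem.List.pop? col (-1) with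
    | none => st
    | some (v, col') =>
      let h' := PySem.List.pySetD h (x - 1) col'
      let result' := result ++ [v]
      if 2 ≤ result'.length ∧
          PySem.List.pyGetD result' (-1) 0 = PySem.List.pyGetD result' (-2) 0 then
        (answer + 2, h', result'.dropLast.dropLast)
      else (answer, h', result')
  else st

def solution (board : List (List Int)) (moves : List Int) : Int :=
  (moves.foldl pvStepA (0, pvHorizontal board, [])).1

-- ===== PORT B =====
-- board[row][c], nonnegative in-range indices; pyGetD's default is only reached outside Pre_.
def pvCellI (board : List (List Int)) (j c : Int) : Int :=
  PySem.List.pyGetD (PySem.List.pyGetD board j []) c 0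

-- while row < n and board[row][c] == 0: row += 1   (fuel = n bounds the loop; each step increments row)
def pvScanB (board : List (List Int)) (c : Int) : Nat → Int → Int
  | 0, row => row
  | fuel + 1, row =>
    if row < (board.length : Int) ∧ pvCellI board row c = 0 then
      pvScanB board c fuel (row + 1)
    else row

-- body of 'for x in moves'
def pvStepB (board : List (List Int)) (st : Int × List Int × List Int) (x : Int) :
    Int × List Int × List Int :=
  let answer := st.1
  let tops := st.2.1
  let result := st.2.2
  let c := x - 1
  let row := pvScanB board c board.length (PySem.List.pyGetD tops c 0)
  if row < (board.length : Int) then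
    let v := pvCellI board row c
    let tops' := PySem.List.pySetD tops c (row + 1)
    if result ≠ [] ∧ PySem.List.pyGetD result (-1) 0 = v then
      (answer + 2, tops', result.dropLast)
    else (answer, tops', result ++ [v])
  else st

def solution_alt (board : List (List Int)) (moves : List Int) : Int :=
  (moves.foldl (pvStepB board) (0, List.replicate board.length 0, [])).1

-- ===== PRECONDITION & SPEC =====
-- Pre_ excludes (a) boards with a row shorter than the number of rows, and moves with x ≤ -len(board) or
-- x > len(board): there Python A raises IndexError; (b) wraparound moves 1-len(board) ≤ x ≤ 0 on boards with a
-- row LONGER than len(board): there A still returns via accidental negative-index wraparound into its stack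
-- list of len(board) columns, while B's lazy row scan wraps within the longer row — a corner no one would
-- specify (on square boards the two wraps coincide and such moves stay inside Pre_).
def Pre_solution (board : List (List Int)) (moves : List Int) : Prop :=
  (∀ r ∈ board, board.length ≤ r.length) ∧
  (∀ x ∈ moves, (1 ≤ x ∧ x ≤ (board.length : Int)) ∨
    ((1 - (board.length : Int) ≤ x ∧ x ≤ 0) ∧ ∀ r ∈ board, r.length = board.length))
instance (board : List (List Int)) (moves : List Int) : Decidable (Pre_solution board moves) := by
  unfold Pre_solution; infer_instance

def pvWitness_solution : List (List Int) × List Int := ([[0, 1], [2, 3]], [1, 2, 1])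

def Spec_solution (board : List (List Int)) (moves : List Int) (out : Int) : Prop := out = solution_alt board moves
instance (board : List (List Int)) (moves : List Int) (out : Int) : Decidable (Spec_solution board moves out) := by unfold Spec_solution; infer_instance

-- ===== CLAIM (what is proved, stated in full; the proofs are below) =====
def Claim_equal_solution : Prop := ∀ (board : List (List Int)) (moves : List Int), Dom_solution board moves → Pre_solution board moves → Spec_solution board moves (solution board moves)

-- ===== LEMMAS AND PROOFS =====

-- the stack of column c with rows above t already consumed, in bottom-to-top order of A's tmp reversed:
-- ascending rows t..n-1, nonzero cells only
def pvAsc (board : List (List Int)) (c t : Int) : List Int :=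
  ((PySem.List.pyRange t (board.length : Int) 1).filter
      (fun j => decide (pvCellI board j c ≠ 0))).map (fun j => pvCellI board j c)

lemma pvColA_eq_asc (board : List (List Int)) (i : Int) :
    pvColA board i = (pvAsc board i 0).reverse := by
  unfold pvColA pvAsc
  simp only [pvCellI]
  have h1 : PySem.List.pyRange ((board.length : Int) - 1) (-1) (-1)
      = (PySem.List.pyRange 0 (board.length : Int) 1).reverse := by
    have := PySem.List.pyRange_neg_one_eq_reverse ((board.length : Int) - 1) (-1)
    simpa using this
  rw [h1]
  have h2 := PySem.List.foldl_append_if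
      (fun j => decide (pvCellI board j i ≠ 0)) (fun j => pvCellI board j i)
      ((PySem.List.pyRange 0 (board.length : Int) 1).reverse) []
  simp only [decide_eq_true_eq, pvCellI] at h2
  rw [h2]
  simp [List.filter_reverse, List.map_reverse]

lemma pvScanB_spec (board : List (List Int)) (c : Int) :
    ∀ (fuel : Nat) (t : Int), 0 ≤ t → t ≤ (board.length : Int) →
      (board.length : Int) - t ≤ fuel →
      t ≤ pvScanB board c fuel t ∧ pvScanB board c fuel t ≤ (board.length : Int) ∧
      (∀ j, t ≤ j → j < pvScanB board c fuel t → pvCellI board j c = 0) ∧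
      (pvScanB board c fuel t < (board.length : Int) → pvCellI board (pvScanB board c fuel t) c ≠ 0) := by
  intro fuel
  induction fuel with
  | zero =>
    intro t h0 hn hf
    have : t = (board.length : Int) := by omega
    simp only [pvScanB]
    refine ⟨le_refl _, by omega, ?_, by omega⟩
    intro j hj1 hj2; omega
  | succ fuel ih =>
    intro t h0 hn hf
    simp only [pvScanB]
    by_cases hg : t < (board.length : Int) ∧ pvCellI board t c = 0
    · rw [if_pos hg]
      obtain ⟨ih1, ih2, ih3, ih4⟩ := ih (t + 1) (by omega) (by omega) (by omega)
      refine ⟨by omega, ih2, ?_, ih4⟩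
      intro j hj1 hj2
      rcases eq_or_lt_of_le hj1 with h | h
      · rw [← h]; exact hg.2
      · exact ih3 j (by omega) hj2
    · rw [if_neg hg]
      refine ⟨le_refl _, hn, ?_, ?_⟩
      · intro j hj1 hj2; omega
      · intro hlt hne
        exact hg ⟨hlt, hne⟩

lemma pvAsc_decomp (board : List (List Int)) (c t : Int) (h0 : 0 ≤ t)
    (hn : t ≤ (board.length : Int)) :
    pvAsc board c t =
      if pvScanB board c board.length t < (board.length : Int) then
        pvCellI board (pvScanB board c board.length t) c ::
          pvAsc board c (pvScanB board c board.length t + 1)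
      else [] := by
  obtain ⟨h1, h2, h3, h4⟩ := pvScanB_spec board c board.length t h0 hn (by omega)
  set r := pvScanB board c board.length t with hr
  unfold pvAsc
  have hsplit : PySem.List.pyRange t (board.length : Int) 1
      = PySem.List.pyRange t r 1 ++ PySem.List.pyRange r (board.length : Int) 1 :=
    PySem.List.pyRange_one_append t r _ h1 h2
  rw [hsplit, List.filter_append, List.map_append]
  have hnil : (PySem.List.pyRange t r 1).filter (fun j => decide (pvCellI board j c ≠ 0)) = [] := by
    rw [List.filter_eq_nil_iff]
    intro j hj
    rw [PySem.List.mem_pyRange_one] at hj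
    simp [h3 j hj.1 hj.2]
  rw [hnil]
  by_cases hlt : r < (board.length : Int)
  · rw [if_pos hlt, PySem.List.pyRange_one_cons hlt]
    have : (pvCellI board r c ≠ 0) := h4 hlt
    simp [this]
  · rw [if_neg hlt]
    have : r = (board.length : Int) := by omega
    rw [this, PySem.List.pyRange_one_eq_nil (le_refl _)]
    simp

-- the loop invariant tying A's remaining stacks to B's top pointers
def pvRel (board : List (List Int)) (h : List (List Int)) (tops : List Int) : Prop :=
  h.length = board.length ∧ tops.length = board.length ∧
  ∀ c : Nat, c < board.length →
    0 ≤ tops.getD c 0 ∧ tops.getD c 0 ≤ (board.length : Int) ∧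
    h.getD c [] = (pvAsc board ((c : Nat) : Int) (tops.getD c 0)).reverse

lemma pvHorizontal_eq_map (board : List (List Int)) :
    pvHorizontal board = (PySem.List.pyRange 0 (board.length : Int) 1).map (pvColA board) := by
  unfold pvHorizontal
  simpa using PySem.List.foldl_append_singleton_eq_map (pvColA board)
    (PySem.List.pyRange 0 (board.length : Int) 1) []

lemma pvRel_init (board : List (List Int)) :
    pvRel board (pvHorizontal board) (List.replicate board.length 0) := by
  refine ⟨?_, by simp, ?_⟩
  · rw [pvHorizontal_eq_map]
    simp [PySem.List.length_pyRange_one]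
  · intro c hc
    have htop : (List.replicate board.length (0 : Int)).getD c 0 = 0 := by
      rw [List.getD_eq_getElem _ _ (by simpa using hc)]
      simp
    rw [htop]
    refine ⟨le_refl 0, Int.natCast_nonneg _, ?_⟩
    rw [pvHorizontal_eq_map, List.getD_eq_getElem?_getD,
      PySem.List.getElem?_map_pyRange_zero (pvColA board) board.length c hc]
    simpa using pvColA_eq_asc board (c : Int)

lemma pvStep_eq (board : List (List Int)) (x a : Int) (res : List Int)
    (h : List (List Int)) (tops : List Int)
    (hx1 : 1 ≤ x) (hx2 : x ≤ (board.length : Int))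
    (hrel : pvRel board h tops) :
    (pvStepA (a, h, res) x).1 = (pvStepB board (a, tops, res) x).1 ∧
    (pvStepA (a, h, res) x).2.2 = (pvStepB board (a, tops, res) x).2.2 ∧
    pvRel board (pvStepA (a, h, res) x).2.1 (pvStepB board (a, tops, res) x).2.1 := by
  obtain ⟨hh, ht, hinv⟩ := hrel
  have hn0 : (0 : Int) ≤ x - 1 := by omega
  have hci : (x - 1).toNat < board.length := by omega
  have hcast : (((x - 1).toNat : Nat) : Int) = x - 1 := by omega
  obtain ⟨htop0, htopn, hcol⟩ := hinv (x - 1).toNat hci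
  have htops_get : PySem.List.pyGetD tops (x - 1) 0 = tops.getD (x - 1).toNat 0 := by
    rw [PySem.List.pyGetD_eq_getElem tops 0 hn0 (by omega),
      List.getD_eq_getElem tops 0 (by omega)]
  have hh_get : PySem.List.pyGetD h (x - 1) []
      = (pvAsc board (x - 1) (tops.getD (x - 1).toNat 0)).reverse := by
    rw [PySem.List.pyGetD_eq_getElem h [] hn0 (by omega)]
    rw [List.getD_eq_getElem h [] (by omega), hcast] at hcol
    exact hcol
  obtain ⟨hr1, hr2, hr3, hr4⟩ :=
    pvScanB_spec board (x - 1) board.length (tops.getD (x - 1).toNat 0) htop0 htopn (by omega)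
  have hdecomp := pvAsc_decomp board (x - 1) (tops.getD (x - 1).toNat 0) htop0 htopn
  set r := pvScanB board (x - 1) board.length (tops.getD (x - 1).toNat 0) with hrdef
  by_cases hrn : r < (board.length : Int)
  · -- a block is found at row r
    set v := pvCellI board r (x - 1) with hvdef
    have hasc : pvAsc board (x - 1) (tops.getD (x - 1).toNat 0)
        = v :: pvAsc board (x - 1) (r + 1) := by
      rw [hdecomp, if_pos hrn]
    have hA : pvStepA (a, h, res) x =
        (if 2 ≤ (res ++ [v]).length ∧
            PySem.List.pyGetD (res ++ [v]) (-1) 0 = PySem.List.pyGetD (res ++ [v]) (-2) 0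
         then (a + 2, PySem.List.pySetD h (x - 1) (pvAsc board (x - 1) (r + 1)).reverse,
                (res ++ [v]).dropLast.dropLast)
         else (a, PySem.List.pySetD h (x - 1) (pvAsc board (x - 1) (r + 1)).reverse,
                res ++ [v])) := by
      simp only [pvStepA]
      rw [hh_get, hasc, List.reverse_cons, PySem.List.pop?_last]
      simp
    have hB : pvStepB board (a, tops, res) x =
        (if res ≠ [] ∧ PySem.List.pyGetD res (-1) 0 = v
         then (a + 2, PySem.List.pySetD tops (x - 1) (r + 1), res.dropLast)
         else (a, PySem.List.pySetD tops (x - 1) (r + 1), res ++ [v])) := by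
      simp only [pvStepB]
      rw [htops_get, ← hrdef, if_pos hrn]
    have hcond : (2 ≤ (res ++ [v]).length ∧
        PySem.List.pyGetD (res ++ [v]) (-1) 0 = PySem.List.pyGetD (res ++ [v]) (-2) 0)
        ↔ (res ≠ [] ∧ PySem.List.pyGetD res (-1) 0 = v) := by
      by_cases hres : res = []
      · subst hres
        simp
      · have hlr : res.length - 1 < res.length := by
          cases res with
          | nil => exact absurd rfl hres
          | cons y ys => simp
        have h2 : PySem.List.pyGetD (res ++ [v]) (-2) 0 = res[res.length - 1] := by
          rw [PySem.List.pyGetD_neg_ofNat (res ++ [v]) 2 0 (by omega) (by simp; omega)]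
          have hstep : (res ++ [v])[res.length - 1]'(by simp only [List.length_append, List.length_singleton]; omega) = res[res.length - 1] :=
            List.getElem_append_left hlr
          rw [← hstep]
          congr 1
          simp only [List.length_append, List.length_singleton]
          omega
        rw [PySem.List.pyGetD_neg_one_append_singleton, h2,
          PySem.List.pyGetD_neg_one res 0 hres, List.getLast_eq_getElem]
        constructor
        · rintro ⟨_, he⟩; exact ⟨hres, he.symm⟩
        · rintro ⟨_, he⟩; exact ⟨by simp; omega, he.symm⟩
    have hrel' : pvRel board (PySem.List.pySetD h (x - 1) (pvAsc board (x - 1) (r + 1)).reverse)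
        (PySem.List.pySetD tops (x - 1) (r + 1)) := by
      rw [PySem.List.pySetD_of_nonneg h _ hn0, PySem.List.pySetD_of_nonneg tops _ hn0]
      refine ⟨by simp [hh], by simp [ht], ?_⟩
      intro c' hc'
      by_cases hcc : c' = (x - 1).toNat
      · subst hcc
        have hset1 : (tops.set (x - 1).toNat (r + 1)).getD (x - 1).toNat 0 = r + 1 := by
          rw [List.getD_eq_getElem _ _ (by simp [ht]; omega)]
          exact List.getElem_set_self _
        have hset2 : (h.set (x - 1).toNat (pvAsc board (x - 1) (r + 1)).reverse).getD (x - 1).toNat []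
            = (pvAsc board (x - 1) (r + 1)).reverse := by
          rw [List.getD_eq_getElem _ _ (by simp [hh]; omega)]
          exact List.getElem_set_self _
        rw [hset1, hset2, hcast]
        exact ⟨by omega, by omega, rfl⟩
      · obtain ⟨hb1, hb2, hb3⟩ := hinv c' hc'
        have hset1 : (tops.set (x - 1).toNat (r + 1)).getD c' 0 = tops.getD c' 0 := by
          rw [List.getD_eq_getElem _ _ (by simp [ht]; omega),
            List.getElem_set_ne (fun he => hcc he.symm),
            List.getD_eq_getElem tops 0 (by omega)]
        have hset2 : (h.set (x - 1).toNat (pvAsc board (x - 1) (r + 1)).reverse).getD c' []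
            = h.getD c' [] := by
          rw [List.getD_eq_getElem _ _ (by simp [hh]; omega),
            List.getElem_set_ne (fun he => hcc he.symm),
            List.getD_eq_getElem h [] (by omega)]
        rw [hset1, hset2]
        exact ⟨hb1, hb2, hb3⟩
    rw [hA, hB]
    by_cases hc : res ≠ [] ∧ PySem.List.pyGetD res (-1) 0 = v
    · rw [if_pos (hcond.mpr hc), if_pos hc]
      exact ⟨rfl, by simp, hrel'⟩
    · rw [if_neg (fun hx => hc (hcond.mp hx)), if_neg hc]
      exact ⟨rfl, rfl, hrel'⟩
  · -- the column is exhausted: both sides leave the state unchanged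
    have hascnil : pvAsc board (x - 1) (tops.getD (x - 1).toNat 0) = [] := by
      rw [hdecomp, if_neg hrn]
    have hA : pvStepA (a, h, res) x = (a, h, res) := by
      simp only [pvStepA]
      rw [hh_get, hascnil]
      simp
    have hB : pvStepB board (a, tops, res) x = (a, tops, res) := by
      simp only [pvStepB]
      rw [htops_get, ← hrdef, if_neg hrn]
    rw [hA, hB]
    exact ⟨rfl, rfl, hh, ht, hinv⟩

lemma pvIdx_wrap (n : Nat) (i : Int) (h1 : -(n : Int) ≤ i) (h2 : i < 0) :
    PySem.List.pyIdx? n i = PySem.List.pyIdx? n (i + n) := by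
  simp only [PySem.List.pyIdx?]
  rw [if_neg (by omega), if_pos h1, if_pos (by omega : (0 : Int) ≤ i + n),
    if_pos (by omega : i + (n : Int) < n)]
  congr 1
  omega

lemma pvGetD_wrap {α : Type} (xs : List α) (i : Int) (d : α)
    (h1 : -(xs.length : Int) ≤ i) (h2 : i < 0) :
    PySem.List.pyGetD xs i d = PySem.List.pyGetD xs (i + xs.length) d := by
  simp only [PySem.List.pyGetD, PySem.List.pyGet?, pvIdx_wrap xs.length i h1 h2]

lemma pvSetD_wrap {α : Type} (xs : List α) (i : Int) (v : α)
    (h1 : -(xs.length : Int) ≤ i) (h2 : i < 0) :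
    PySem.List.pySetD xs i v = PySem.List.pySetD xs (i + xs.length) v := by
  simp only [PySem.List.pySetD, PySem.List.pySet?, pvIdx_wrap xs.length i h1 h2]

lemma pvCell_wrap (board : List (List Int)) (hsq : ∀ r ∈ board, r.length = board.length)
    (c : Int) (h1 : -(board.length : Int) ≤ c) (h2 : c < 0)
    (j : Int) (hj : 0 ≤ j) :
    pvCellI board j c = pvCellI board j (c + board.length) := by
  unfold pvCellI
  by_cases hjl : j < (board.length : Int)
  · rw [PySem.List.pyGetD_eq_getElem board [] hj hjl]
    have hlen : (board[j.toNat]'(by omega)).length = board.length :=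
      hsq _ (List.getElem_mem _)
    rw [pvGetD_wrap _ c 0 (by rw [hlen]; exact h1) h2, hlen]
  · have hnone : PySem.List.pyGet? board j = none := by
      rw [PySem.List.pyGet?_eq_none_iff]
      simp only [PySem.Raise.InRange]
      omega
    rw [PySem.List.pyGetD_of_none board j [] hnone]
    simp [PySem.List.pyGetD, PySem.List.pyGet?]

lemma pvScanB_ge (board : List (List Int)) (c : Int) :
    ∀ (fuel : Nat) (t : Int), t ≤ pvScanB board c fuel t := by
  intro fuel
  induction fuel with
  | zero => intro t; exact le_refl _
  | succ f ih =>
    intro t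
    simp only [pvScanB]
    split_ifs with hg
    · exact le_trans (by omega) (ih (t + 1))
    · exact le_refl _

lemma pvScanB_wrap (board : List (List Int)) (hsq : ∀ r ∈ board, r.length = board.length)
    (c : Int) (h1 : -(board.length : Int) ≤ c) (h2 : c < 0) :
    ∀ (fuel : Nat) (t : Int), 0 ≤ t →
      pvScanB board c fuel t = pvScanB board (c + board.length) fuel t := by
  intro fuel
  induction fuel with
  | zero => intro t _; rfl
  | succ f ih =>
    intro t ht
    simp only [pvScanB, pvCell_wrap board hsq c h1 h2 t ht]
    split_ifs with hg
    · exact ih (t + 1) (by omega)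
    · rfl

lemma pvStepA_wrap (a : Int) (res : List Int) (h : List (List Int)) (x : Int) (n : Nat)
    (hn : h.length = n) (hw1 : -(n : Int) ≤ x - 1) (hw2 : x - 1 < 0) :
    pvStepA (a, h, res) x = pvStepA (a, h, res) (x + n) := by
  have hset : ∀ v : List Int,
      PySem.List.pySetD h (x + (n : Int) - 1) v = PySem.List.pySetD h (x - 1) v := by
    intro v
    rw [show x + (n : Int) - 1 = (x - 1) + n by ring, ← hn,
      ← pvSetD_wrap h (x - 1) v (by omega) hw2]
  have hget : PySem.List.pyGetD h (x + (n : Int) - 1) [] = PySem.List.pyGetD h (x - 1) [] := by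
    rw [show x + (n : Int) - 1 = (x - 1) + n by ring, ← hn,
      ← pvGetD_wrap h (x - 1) [] (by omega) hw2]
  simp only [pvStepA, hset, hget]

lemma pvStepB_wrap (board : List (List Int)) (hsq : ∀ r ∈ board, r.length = board.length)
    (a : Int) (tops res : List Int) (x : Int)
    (ht : tops.length = board.length)
    (h0 : 0 ≤ PySem.List.pyGetD tops (x - 1) 0)
    (hw1 : -(board.length : Int) ≤ x - 1) (hw2 : x - 1 < 0) :
    pvStepB board (a, tops, res) x = pvStepB board (a, tops, res) (x + board.length) := by
  have hget : PySem.List.pyGetD tops (x + (board.length : Int) - 1) 0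
      = PySem.List.pyGetD tops (x - 1) 0 := by
    rw [show x + (board.length : Int) - 1 = (x - 1) + board.length by ring, ← ht,
      ← pvGetD_wrap tops (x - 1) 0 (by omega) hw2]
  have hset : ∀ v : Int,
      PySem.List.pySetD tops (x + (board.length : Int) - 1) v
        = PySem.List.pySetD tops (x - 1) v := by
    intro v
    rw [show x + (board.length : Int) - 1 = (x - 1) + board.length by ring, ← ht,
      ← pvSetD_wrap tops (x - 1) v (by omega) hw2]
  have hcell : ∀ j : Int, 0 ≤ j →
      pvCellI board j (x + (board.length : Int) - 1) = pvCellI board j (x - 1) := by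
    intro j hj
    rw [show x + (board.length : Int) - 1 = (x - 1) + board.length by ring,
      ← pvCell_wrap board hsq (x - 1) hw1 hw2 j hj]
  have hscan : pvScanB board (x + (board.length : Int) - 1) board.length
      (PySem.List.pyGetD tops (x - 1) 0)
      = pvScanB board (x - 1) board.length (PySem.List.pyGetD tops (x - 1) 0) := by
    rw [show x + (board.length : Int) - 1 = (x - 1) + board.length by ring,
      ← pvScanB_wrap board hsq (x - 1) hw1 hw2 board.length _ h0]
  simp only [pvStepB, hget, hset, hscan]
  rw [hcell _ (le_trans h0 (pvScanB_ge board (x - 1) board.length _))]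

lemma pvFold_eq (board : List (List Int)) :
    ∀ (moves : List Int) (a : Int) (res : List Int) (h : List (List Int)) (tops : List Int),
      (∀ x ∈ moves, (1 ≤ x ∧ x ≤ (board.length : Int)) ∨
        ((1 - (board.length : Int) ≤ x ∧ x ≤ 0) ∧ ∀ r ∈ board, r.length = board.length)) →
      pvRel board h tops →
      (moves.foldl pvStepA (a, h, res)).1 = (moves.foldl (pvStepB board) (a, tops, res)).1 := by
  intro moves
  induction moves with
  | nil => intro a res h tops _ _; rfl
  | cons x moves ih =>
    intro a res h tops hmv hrel
    simp only [List.foldl_cons]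
    -- replace a wraparound move x by the equivalent in-range move x + len(board)
    obtain ⟨x', hx1, hx2, hAx, hBx⟩ :
        ∃ x', 1 ≤ x' ∧ x' ≤ (board.length : Int) ∧
          pvStepA (a, h, res) x = pvStepA (a, h, res) x' ∧
          pvStepB board (a, tops, res) x = pvStepB board (a, tops, res) x' := by
      rcases hmv x (List.mem_cons_self) with ⟨hx1, hx2⟩ | ⟨⟨hw1, hw2⟩, hsq⟩
      · exact ⟨x, hx1, hx2, rfl, rfl⟩
      · obtain ⟨hh, ht, hinv⟩ := hrel
        have h0 : 0 ≤ PySem.List.pyGetD tops (x - 1) 0 := by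
          rw [pvGetD_wrap tops (x - 1) 0 (by omega) (by omega),
            PySem.List.pyGetD_eq_getElem tops 0 (by omega) (by omega)]
          have hb := (hinv ((x - 1) + (tops.length : Int)).toNat (by omega)).1
          rw [List.getD_eq_getElem tops 0 (by omega)] at hb
          exact hb
        refine ⟨x + board.length, by omega, by omega, ?_, ?_⟩
        · exact pvStepA_wrap a res h x board.length hh (by omega) (by omega)
        · exact pvStepB_wrap board hsq a tops res x ht h0 (by omega) (by omega)
    rw [hAx, hBx]
    obtain ⟨e1, e2, hrel'⟩ := pvStep_eq board x' a res h tops hx1 hx2 hrel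
    have hA : pvStepA (a, h, res) x'
        = ((pvStepA (a, h, res) x').1, (pvStepA (a, h, res) x').2.1, (pvStepA (a, h, res) x').2.2) := rfl
    have hB : pvStepB board (a, tops, res) x'
        = ((pvStepB board (a, tops, res) x').1, (pvStepB board (a, tops, res) x').2.1,
            (pvStepB board (a, tops, res) x').2.2) := rfl
    rw [hA, hB, e1, e2]
    exact ih _ _ _ _ (fun y hy => hmv y (List.mem_cons_of_mem _ hy)) hrel'

-- ===== VERDICT (by name: the statement is the Claim_ definition above) =====
theorem solution_spec : Claim_equal_solution := by
  intro board moves _ hpre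
  unfold Spec_solution solution solution_alt
  exact pvFold_eq board moves 0 [] _ _ hpre.2 (pvRel_init board)
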